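-- pv_equiv track=rewrite | github.com/Pkpallaw16/Data-Structure-And-Algorithms | 10 Queue/2Generate binary numbers between 1 to `n`.py | generate
-- ===== SOURCE A (Python) =====
-- from collections import deque
--
-- def generate(n):
--     q = deque()
--     q.append('1')
--     st=[]
--     for i in range(n):
--         front = str(q.popleft())
--         st.append(front)
--
--         q.append(front + '0')
--         q.append(front + '1')
--
--     return st
-- ===== SOURCE B (Python) =====
-- def generate(n):
--     return [bin(i)[2:] for i in range(1, n + 1)]
-- ===== Notes on version B (the rewrite author's own statement) =====
-- stated objective: simpler
-- what changed: Replaced the deque-based BFS generation (pop a prefix, push prefix+'0' and prefix+'1') by a direct one-line list comprehension that computes each binary representation independently with bin(i)[2:] for i in 1..n.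
import Mathlib
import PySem

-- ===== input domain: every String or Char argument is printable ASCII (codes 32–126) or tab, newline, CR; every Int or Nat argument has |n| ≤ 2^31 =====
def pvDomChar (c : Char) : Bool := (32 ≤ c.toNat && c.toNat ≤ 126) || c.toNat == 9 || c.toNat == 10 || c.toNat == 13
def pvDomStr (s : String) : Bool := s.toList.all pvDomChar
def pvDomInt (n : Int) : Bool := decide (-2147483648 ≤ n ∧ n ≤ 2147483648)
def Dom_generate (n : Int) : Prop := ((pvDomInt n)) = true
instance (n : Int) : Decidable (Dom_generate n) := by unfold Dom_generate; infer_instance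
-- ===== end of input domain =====

-- B replaces A's deque-based BFS generation by a direct per-integer binary representation (repeated halving), dropping the queue; objective: simpler.


-- ===== PORT A =====
-- one loop iteration: popleft (the [] branch is unreachable — the queue is never empty —
-- it only makes the match total), record the front, push front+'0' and front+'1'
def generateStep (qs : List String × List String) : List String × List String :=
  match qs with
  | ([], st) => ([], st)
  | (f :: rest, st) => (rest ++ [f ++ "0", f ++ "1"], st ++ [f])

def generate (n : Int) : List String :=
  (PySem.List.pyRange 0 n 1).foldl (fun qs _ => generateStep qs) (["1"], []) |>.2

-- ===== PORT B =====
-- bin(i)[2:] for i ≥ 0, built by repeated division (most significant digit first)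
def binChars (m : Nat) : List Char :=
  if m ≤ 1 then [if m = 1 then '1' else '0']
  else binChars (m / 2) ++ [if m % 2 = 1 then '1' else '0']
  decreasing_by exact Nat.div_lt_self (by omega) (by omega)

def generate_alt (n : Int) : List String :=
  (PySem.List.pyRange 1 (n + 1) 1).map (fun i => String.ofList (binChars i.toNat))

-- ===== PRECONDITION & SPEC =====
def Spec_generate (n : Int) (out : List String) : Prop := out = generate_alt n
instance (n : Int) (out : List String) : Decidable (Spec_generate n out) := by unfold Spec_generate; infer_instance

-- ===== CLAIM (what is proved, stated in full; the proofs are below) =====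
def Claim_equal_generate : Prop := ∀ (n : Int), Dom_generate n → Spec_generate n (generate n)

-- ===== LEMMAS AND PROOFS =====

def bstr (m : Nat) : String := String.ofList (binChars m)

theorem binChars_double {m : Nat} (h : 1 ≤ m) : binChars (2 * m) = binChars m ++ ['0'] := by
  rw [binChars]
  have h1 : ¬ 2 * m ≤ 1 := by omega
  simp [h1, Nat.mul_div_cancel_left m (by omega : 0 < 2), Nat.mul_mod_right]

theorem binChars_double_add_one {m : Nat} (h : 1 ≤ m) :
    binChars (2 * m + 1) = binChars m ++ ['1'] := by
  rw [binChars]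
  have h1 : ¬ 2 * m + 1 ≤ 1 := by omega
  have h2 : (2 * m + 1) / 2 = m := by omega
  have h3 : (2 * m + 1) % 2 = 1 := by omega
  simp [h1, h2, h3]

-- invariant: after k iterations the queue holds bin(k+1) … bin(2k+1) and st holds bin(1) … bin(k)
theorem bstr_even {m : Nat} (h : 1 ≤ m) : bstr (2 * m) = bstr m ++ "0" := by
  unfold bstr
  rw [binChars_double h, String.ofList_append]

theorem bstr_odd {m : Nat} (h : 1 ≤ m) : bstr (2 * m + 1) = bstr m ++ "1" := by
  unfold bstr
  rw [binChars_double_add_one h, String.ofList_append]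

theorem generate_inv (k : Nat) :
    generateStep^[k] (["1"], []) =
      ((List.range' (k + 1) (k + 1)).map bstr, (List.range' 1 k).map bstr) := by
  induction k with
  | zero =>
    have h1 : bstr 1 = "1" := by
      unfold bstr; rw [binChars]; decide
    simp [List.range', h1]
  | succ k ih =>
    rw [Function.iterate_succ_apply', ih]
    have hcons : List.range' (k + 1) (k + 1) = (k + 1) :: List.range' (k + 2) k := by
      rw [List.range'_succ]
    rw [hcons]
    simp only [List.map_cons, generateStep]
    have hq : List.range' (k + 2) k ++ [2 * (k + 1), 2 * (k + 1) + 1] =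
        List.range' (k + 1 + 1) (k + 1 + 1) := by
      have h1 : List.range' (k + 1 + 1) (k + 1 + 1) =
          List.range' (k + 1 + 1) (k + 1) ++ [(k + 1 + 1) + (k + 1)] := List.range'_1_concat
      have h2 : List.range' (k + 1 + 1) (k + 1) =
          List.range' (k + 1 + 1) k ++ [(k + 1 + 1) + k] := List.range'_1_concat
      rw [h1, h2, List.append_assoc, List.singleton_append,
        show (k + 1 + 1) + k = 2 * (k + 1) by omega,
        show (k + 1 + 1) + (k + 1) = 2 * (k + 1) + 1 by omega,
        show k + 1 + 1 = k + 2 by omega]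
    have hst : List.range' 1 (k + 1) = List.range' 1 k ++ [1 + k] := List.range'_1_concat
    rw [Prod.mk.injEq]
    refine ⟨?_, ?_⟩
    · rw [← bstr_even (m := k + 1) (by omega), ← bstr_odd (m := k + 1) (by omega)]
      show List.map bstr (List.range' (k + 2) k) ++
        List.map bstr [2 * (k + 1), 2 * (k + 1) + 1] = _
      rw [← List.map_append, hq]
    · rw [hst, show (1 : Nat) + k = k + 1 by omega, List.map_append]
      rfl

theorem generate_eq (n : Int) : generate n = (List.range' 1 n.toNat).map bstr := by
  unfold generate
  rw [List.foldl_const generateStep (["1"], []) (PySem.List.pyRange 0 n 1)]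
  have hlen : (PySem.List.pyRange 0 n 1).length = n.toNat := by
    rw [PySem.List.length_pyRange_one]; simp
  rw [hlen, generate_inv]

theorem generate_alt_eq (n : Int) : generate_alt n = (List.range' 1 n.toNat).map bstr := by
  unfold generate_alt
  rw [PySem.List.pyRange_one, List.range'_eq_map_range]
  have : (n + 1 - 1) = n := by ring
  rw [this, List.map_map, List.map_map]
  apply List.map_congr_left
  intro k hk
  simp only [Function.comp, bstr]
  congr 2

-- ===== VERDICT (by name: the statement is the Claim_ definition above) =====
theorem generate_spec : Claim_equal_generate := by
  intro n _
  unfold Spec_generate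
  rw [generate_eq, generate_alt_eq]
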